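-- pv_equiv track=rewrite | github.com/CEIA-Alcateia-AI/ka-two-b | src/processing/subtitle_aligner.py | _find_natural_text_break
-- ===== SOURCE A (Python) =====
-- def _find_natural_text_break(full_text: str, start_pos: int, target_end: int) -> str:
--     """
--     Encontra quebra natural no texto (espaco, ponto, virgula)
--     para evitar cortar palavras no meio
--     """
--     if target_end >= len(full_text):
--         return full_text[start_pos:].strip()
--
--     # Busca quebra natural em janela de +/- 50 caracteres
--     search_window = 50
--     best_break = target_end
--
--     # Procura por pontos, virgulas, espacos (ordem de preferencia)
--     for char in ['.', '!', '?', ',', ' ']: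
--         # Busca para tras
--         for i in range(min(search_window, target_end - start_pos)):
--             pos = target_end - i
--             if pos > start_pos and full_text[pos] == char:
--                 best_break = pos + 1
--                 break
--         if best_break != target_end:
--             break
--
--     return full_text[start_pos:best_break].strip()
-- ===== SOURCE B (Python) =====
-- def _find_natural_text_break(full_text, start_pos, target_end):
--     if target_end >= len(full_text):
--         return full_text[start_pos:].strip()
--     lo = max(start_pos + 1, target_end - 49)
--     closest = {}
--     for pos in range(target_end, lo - 1, -1):
--         c = full_text[pos]
--         if c in '.!?, ' and c not in closest:
--             closest[c] = pos
--     best_break = target_end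
--     for c in '.!?, ':
--         if c in closest:
--             best_break = closest[c] + 1
--             break
--     return full_text[start_pos:best_break].strip()
-- ===== Notes on version B (the rewrite author's own statement) =====
-- stated objective: alternative
-- what changed: B makes a single backward pass over the search window building a dict of the closest occurrence of each break character, then picks the first preferred character present, replacing A's five separate backward window scans; B also drops A's sentinel test 'best_break != target_end', which makes A silently skip a break found immediately before target_end.
-- intended difference: When the closest in-window occurrence of the first preferred break character present lies exactly at target_end-1 (so best_break equals A's target_end sentinel) and some preferred character has a closest occurrence elsewhere, A falls through to a lower-preference break character and cuts there, while B cuts at the top-preference break as intended. — e.g. on _find_natural_text_break("ab.,x", 0, 3): A returns "ab.,", B returns "ab."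
-- outside the precondition, e.g. on _find_natural_text_break('ab.', -60, 2): A returns 'ab.', B raises IndexError
import Mathlib
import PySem

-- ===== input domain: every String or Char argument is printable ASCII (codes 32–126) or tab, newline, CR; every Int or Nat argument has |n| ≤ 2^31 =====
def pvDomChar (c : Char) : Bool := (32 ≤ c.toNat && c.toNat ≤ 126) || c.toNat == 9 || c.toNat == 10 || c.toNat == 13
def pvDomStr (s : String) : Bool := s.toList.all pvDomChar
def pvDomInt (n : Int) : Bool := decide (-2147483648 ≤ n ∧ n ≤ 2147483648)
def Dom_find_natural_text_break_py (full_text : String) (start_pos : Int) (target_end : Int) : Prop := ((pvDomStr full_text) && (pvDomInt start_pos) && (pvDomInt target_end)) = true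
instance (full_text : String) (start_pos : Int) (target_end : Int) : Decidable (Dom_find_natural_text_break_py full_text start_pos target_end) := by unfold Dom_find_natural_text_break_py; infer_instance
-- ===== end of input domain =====

-- B replaces A's five backward window scans by ONE backward pass that records, in a dict, the
-- closest in-window occurrence of each break character, then takes the first preferred one;
-- B intentionally drops A's 'best_break != target_end' sentinel test (see D_ below).

-- ===== PORT A =====
def pvBreakChars : List Char := ['.', '!', '?', ',', ' ']

-- inner loop 'for i in range(...): pos = target_end - i; if pos > start_pos and full_text[pos] == char: best_break = pos+1; break'
def pvScanA (s : List Char) (sp te : Int) (c : Char) : List Int → Option Int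
  | [] => none
  | i :: rest =>
    let pos := te - i
    if sp < pos then
      if PySem.List.pyGetD s pos (Char.ofNat 0) = c then some (pos + 1)
      else pvScanA s sp te c rest
    else pvScanA s sp te c rest

-- outer loop over the preference characters; 'if best_break != target_end: break'
def pvOuterA (s : List Char) (sp te : Int) : List Char → Int
  | [] => te
  | c :: cs =>
    match pvScanA s sp te c (PySem.List.pyRange 0 (min 50 (te - sp)) 1) with
    | some b => if b ≠ te then b else pvOuterA s sp te cs
    | none => pvOuterA s sp te cs

def find_natural_text_break_py (full_text : String) (start_pos : Int) (target_end : Int) : String :=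
  let s := full_text.toList
  if target_end ≥ (s.length : Int) then
    String.ofList (PySem.Chars.strip (PySem.List.slice s (some start_pos) none))
  else
    let bb := pvOuterA s start_pos target_end pvBreakChars
    String.ofList (PySem.Chars.strip (PySem.List.slice s (some start_pos) (some bb)))

-- ===== PORT B =====
-- one backward pass: dict of the closest (first seen scanning down) position of each break char
def pvCollectB (s : List Char) : List Int → PySem.Dict Char Int → PySem.Dict Char Int
  | [], d => d
  | pos :: rest, d =>
    let c := PySem.List.pyGetD s pos (Char.ofNat 0)
    if pvBreakChars.contains c && !(d.contains c) then
      pvCollectB s rest (d.insert c pos)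
    else pvCollectB s rest d

-- 'for c in '.!?, ': if c in closest: best_break = closest[c] + 1; break'
def pvChooseB (d : PySem.Dict Char Int) (te : Int) : List Char → Int
  | [] => te
  | c :: cs =>
    match d.get? c with
    | some p => p + 1
    | none => pvChooseB d te cs

def find_natural_text_break_py_alt (full_text : String) (start_pos : Int) (target_end : Int) : String :=
  let s := full_text.toList
  if target_end ≥ (s.length : Int) then
    String.ofList (PySem.Chars.strip (PySem.List.slice s (some start_pos) none))
  else
    let lo := max (start_pos + 1) (target_end - 49)
    let d := pvCollectB s (PySem.List.pyRange target_end (lo - 1) (-1)) PySem.Dict.empty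
    let bb := pvChooseB d target_end pvBreakChars
    String.ofList (PySem.Chars.strip (PySem.List.slice s (some start_pos) (some bb)))

-- ===== PRECONDITION & SPEC =====
-- Pre_ excludes negative start_pos: there A's backward probes evaluate full_text[pos] at negative
-- positions, reading characters through Python's negative-index wraparound or raising IndexError
-- below -len — an accident of the index arithmetic (B raises IndexError on part of that region).
def Pre_find_natural_text_break_py (full_text : String) (start_pos : Int) (target_end : Int) : Prop :=
  0 ≤ start_pos

instance (full_text : String) (start_pos : Int) (target_end : Int) : Decidable (Pre_find_natural_text_break_py full_text start_pos target_end) := by unfold Pre_find_natural_text_break_py; infer_instance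

def pvWitness_find_natural_text_break_py : String × Int × Int := ("ab", 0, 1)

-- When the closest in-window occurrence of the first preferred break character present lies exactly
-- at target_end-1 (so best_break equals A's target_end sentinel) and some preferred character has a
-- closest occurrence elsewhere, A falls through to a lower-preference break character and cuts
-- there, while B cuts at the top-preference break, the intended behaviour.
def D_find_natural_text_break_py (full_text : String) (start_pos : Int) (target_end : Int) : Prop :=
  let w := (PySem.Str.slice full_text (some (max (start_pos + 1) (target_end - 49)))
    (some (target_end + 1))).toList
  0 ≤ start_pos ∧ 0 ≤ target_end ∧ target_end < PySem.Str.len full_text ∧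
  pvBreakChars.find? w.contains = w.dropLast.getLast? ∧ w.dropLast.getLast? ≠ none ∧
  w.getLast? ≠ w.dropLast.getLast? ∧
  (pvBreakChars.any fun c => c != ' ' && w.getLast? == some c ||
    !(w.getLast? == some c) && !(w.dropLast.getLast? == some c) &&
      w.dropLast.dropLast.contains c) = true

instance (full_text : String) (start_pos : Int) (target_end : Int) : Decidable (D_find_natural_text_break_py full_text start_pos target_end) := by unfold D_find_natural_text_break_py; infer_instance

def Spec_find_natural_text_break_py (full_text : String) (start_pos : Int) (target_end : Int) (out : String) : Prop := ¬ D_find_natural_text_break_py full_text start_pos target_end → out = find_natural_text_break_py_alt full_text start_pos target_end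
instance (full_text : String) (start_pos : Int) (target_end : Int) (out : String) : Decidable (Spec_find_natural_text_break_py full_text start_pos target_end out) := by unfold Spec_find_natural_text_break_py; infer_instance

def pvDiffWitness_find_natural_text_break_py : String × Int × Int := ("ab.,x", 0, 3)
def pvDiffWitnessOut_find_natural_text_break_py : String × String := ("ab.,", "ab.")

-- ===== CLAIM (what is proved, stated in full; the proofs are below) =====
def Claim_unchanged_find_natural_text_break_py : Prop := ∀ (full_text : String) (start_pos : Int) (target_end : Int), Dom_find_natural_text_break_py full_text start_pos target_end → Pre_find_natural_text_break_py full_text start_pos target_end → Spec_find_natural_text_break_py full_text start_pos target_end (find_natural_text_break_py full_text start_pos target_end)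
def Claim_changed_find_natural_text_break_py : Prop := Dom_find_natural_text_break_py (pvDiffWitness_find_natural_text_break_py.1) (pvDiffWitness_find_natural_text_break_py.2.1) (pvDiffWitness_find_natural_text_break_py.2.2) ∧ Pre_find_natural_text_break_py (pvDiffWitness_find_natural_text_break_py.1) (pvDiffWitness_find_natural_text_break_py.2.1) (pvDiffWitness_find_natural_text_break_py.2.2) ∧ D_find_natural_text_break_py (pvDiffWitness_find_natural_text_break_py.1) (pvDiffWitness_find_natural_text_break_py.2.1) (pvDiffWitness_find_natural_text_break_py.2.2) ∧ find_natural_text_break_py (pvDiffWitness_find_natural_text_break_py.1) (pvDiffWitness_find_natural_text_break_py.2.1) (pvDiffWitness_find_natural_text_break_py.2.2) = pvDiffWitnessOut_find_natural_text_break_py.1 ∧ find_natural_text_break_py_alt (pvDiffWitness_find_natural_text_break_py.1) (pvDiffWitness_find_natural_text_break_py.2.1) (pvDiffWitness_find_natural_text_break_py.2.2) = pvDiffWitnessOut_find_natural_text_break_py.2 ∧ pvDiffWitnessOut_find_natural_text_break_py.1 ≠ pvDiffWitnessOut_find_natural_text_break_py.2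
def Claim_exact_find_natural_text_break_py : Prop := ∀ (full_text : String) (start_pos : Int) (target_end : Int), Dom_find_natural_text_break_py full_text start_pos target_end → Pre_find_natural_text_break_py full_text start_pos target_end → D_find_natural_text_break_py full_text start_pos target_end → find_natural_text_break_py full_text start_pos target_end ≠ find_natural_text_break_py_alt full_text start_pos target_end


-- ===== LEMMAS AND PROOFS =====

def pvAt (s : List Char) (i : Int) : Char := PySem.List.pyGetD s i (Char.ofNat 0)

-- first hit scanning the window backwards (closest-to-target occurrence of c)
def pvFH (s : List Char) (lo te : Int) (c : Char) : Option Int :=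
  (PySem.List.pyRange te (lo - 1) (-1)).find? (fun p => decide (pvAt s p = c))

theorem pv_scan_eq (s : List Char) (sp te : Int) (c : Char) (I : List Int)
    (h : ∀ i ∈ I, sp < te - i) :
    pvScanA s sp te c I
      = ((I.map (fun i => te - i)).find? (fun p => decide (pvAt s p = c))).map (· + 1) := by
  induction I with
  | nil => simp [pvScanA]
  | cons i I ih =>
    have hi := h i (by simp)
    simp only [pvScanA, List.map_cons, List.find?_cons]
    rw [if_pos hi]
    by_cases hc : PySem.List.pyGetD s (te - i) (Char.ofNat 0) = c
    · simp [pvAt, hc]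
    · simp only [pvAt] at *
      simp [hc, ih (fun j hj => h j (by simp [hj]))]

theorem pv_range_map (sp te : Int) :
    PySem.List.pyRange te (max (sp + 1) (te - 49) - 1) (-1)
      = (PySem.List.pyRange 0 (min 50 (te - sp)) 1).map (fun i => te - i) := by
  rw [PySem.List.pyRange_neg_one, PySem.List.pyRange_one, List.map_map]
  have hcnt : (te - (max (sp + 1) (te - 49) - 1)).toNat = (min 50 (te - sp) - 0).toNat := by omega
  rw [hcnt]
  apply List.map_congr_left
  intro k _
  simp only [Function.comp]
  omega

theorem pv_collect_get? (s : List Char) (P : List Int) (d : PySem.Dict Char Int) (c : Char)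
    (hc : c ∈ pvBreakChars) :
    (pvCollectB s P d).get? c = (d.get? c).or (P.find? (fun p => decide (pvAt s p = c))) := by
  induction P generalizing d with
  | nil => simp [pvCollectB]
  | cons pos P ih =>
    simp only [pvCollectB, List.find?_cons]
    by_cases hmem : (pvBreakChars.contains (PySem.List.pyGetD s pos (Char.ofNat 0))
        && !(d.contains (PySem.List.pyGetD s pos (Char.ofNat 0)))) = true
    · rw [if_pos hmem, ih]
      by_cases heq : PySem.List.pyGetD s pos (Char.ofNat 0) = c
      · have hnc : d.contains c = false := by
          rw [← heq]; revert hmem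
          cases d.contains (PySem.List.pyGetD s pos (Char.ofNat 0)) <;> simp
        have hdn : d.get? c = none := by
          have := PySem.Dict.contains_eq_isSome_get? (d := d) (k := c)
          rw [hnc] at this
          exact Option.not_isSome_iff_eq_none.mp (by rw [← this]; simp)
        have hpred : decide (pvAt s pos = c) = true := by simp [pvAt, heq]
        rw [hpred]
        simp only [heq, PySem.Dict.get?_insert_self, hdn]
        simp
      · rw [PySem.Dict.get?_insert_of_ne d pos (fun hh => heq hh.symm)]
        have hpred : decide (pvAt s pos = c) = false := by simp [pvAt, heq]
        rw [hpred]
    · rw [if_neg hmem, ih]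
      by_cases heq : PySem.List.pyGetD s pos (Char.ofNat 0) = c
      · have hcont : d.contains c = true := by
          rw [← heq]; revert hmem
          have : pvBreakChars.contains (PySem.List.pyGetD s pos (Char.ofNat 0)) = true := by
            rw [heq]; exact List.contains_iff_mem.mpr hc
          rw [this]
          cases d.contains (PySem.List.pyGetD s pos (Char.ofNat 0)) <;> simp
        obtain ⟨v, hv⟩ : ∃ v, d.get? c = some v := by
          have := PySem.Dict.contains_eq_isSome_get? (d := d) (k := c)
          rw [hcont] at this
          exact Option.isSome_iff_exists.mp (by rw [← this])
        simp [hv]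
      · have hpred : decide (pvAt s pos = c) = false := by simp [pvAt, heq]
        rw [hpred]

theorem pv_outer_te (s : List Char) (sp te : Int) (f : Char → Option Int)
    (hA : ∀ c, pvScanA s sp te c (PySem.List.pyRange 0 (min 50 (te - sp)) 1) = (f c).map (· + 1)) :
    ∀ cs : List Char, (∀ c ∈ cs, f c = none ∨ f c = some (te - 1)) → pvOuterA s sp te cs = te := by
  intro cs
  induction cs with
  | nil => intro _; rfl
  | cons c cs ih =>
    intro h
    simp only [pvOuterA]
    rw [hA c]
    rcases h c (by simp) with h0 | h1
    · simp only [h0, Option.map_none]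
      exact ih fun c hc => h c (by simp [hc])
    · simp only [h1, Option.map_some]
      have : ¬ (te - 1 + 1 ≠ te) := by omega
      simp only [this, if_false]
      exact ih fun c hc => h c (by simp [hc])

theorem pv_outer_choose (s : List Char) (sp te : Int) (f : Char → Option Int)
    (d : PySem.Dict Char Int)
    (hA : ∀ c, pvScanA s sp te c (PySem.List.pyRange 0 (min 50 (te - sp)) 1) = (f c).map (· + 1)) :
    ∀ cs : List Char, (∀ c ∈ cs, d.get? c = f c) →
      (∀ c, cs.find? (fun c => (f c).isSome) = some c → f c ≠ some (te - 1)) →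
      pvOuterA s sp te cs = pvChooseB d te cs := by
  intro cs
  induction cs with
  | nil => intro _ _; rfl
  | cons c cs ih =>
    intro hd hfind
    simp only [pvOuterA, pvChooseB]
    rw [hA c, hd c (by simp)]
    cases hf : f c with
    | none =>
      simp only [Option.map_none]
      apply ih (fun c hc => hd c (by simp [hc]))
      intro c' hc'
      apply hfind
      rw [List.find?_cons]
      simp [hf, hc']
    | some p =>
      have hne : f c ≠ some (te - 1) := by
        apply hfind
        rw [List.find?_cons]
        simp [hf]
      have hp : p ≠ te - 1 := by rw [hf] at hne; intro hh; exact hne (by rw [hh])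
      simp only [Option.map_some]
      have : (p + 1 ≠ te) := by omega
      simp [this]

theorem pv_FH_mem (s : List Char) (lo te : Int) (c : Char) (p : Int)
    (h : pvFH s lo te c = some p) : lo ≤ p ∧ p ≤ te ∧ pvAt s p = c := by
  have hm := List.mem_of_find?_eq_some h
  have hp := List.find?_some h
  rw [PySem.List.mem_pyRange_neg_one] at hm
  refine ⟨by omega, by omega, by simpa using hp⟩

theorem pv_FH_isSome (s : List Char) (lo te : Int) (c : Char) :
    (pvFH s lo te c).isSome
      = (PySem.List.pyRange lo (te + 1) 1).any (fun p => decide (pvAt s p = c)) := by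
  rcases hb : (PySem.List.pyRange lo (te + 1) 1).any (fun p => decide (pvAt s p = c)) with _ | _
  · rw [List.any_eq_false] at hb
    rcases hf : pvFH s lo te c with _ | p
    · rfl
    · exfalso
      obtain ⟨h1, h2, h3⟩ := pv_FH_mem s lo te c p hf
      exact absurd (by simpa using h3) (by simpa using hb p (PySem.List.mem_pyRange_one.mpr (by omega)))
  · rw [List.any_eq_true] at hb
    obtain ⟨p, hp, hpred⟩ := hb
    rw [PySem.List.mem_pyRange_one] at hp
    have : ∃ x ∈ PySem.List.pyRange te (lo - 1) (-1), decide (pvAt s x = c) := by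
      exact ⟨p, PySem.List.mem_pyRange_neg_one.mpr (by omega), hpred⟩
    rw [← List.find?_isSome] at this
    simpa [pvFH] using this

theorem pv_FH_te1 (s : List Char) (lo te : Int) (c : Char) (h1 : lo ≤ te - 1) :
    pvFH s lo te c = some (te - 1) ↔ (pvAt s (te - 1) = c ∧ pvAt s te ≠ c) := by
  unfold pvFH
  rw [PySem.List.pyRange_neg_one_cons (by omega), PySem.List.pyRange_neg_one_cons (by omega)]
  by_cases hte : pvAt s te = c
  · rw [List.find?_cons_of_pos (by simpa using hte)]
    constructor
    · intro hh
      have : te = te - 1 := by injection hh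
      omega
    · rintro ⟨_, hh⟩
      exact absurd hte hh
  · rw [List.find?_cons_of_neg (by simpa using hte)]
    by_cases hte1 : pvAt s (te - 1) = c
    · rw [List.find?_cons_of_pos (by simpa using hte1)]
      simp [hte1, hte]
    · rw [List.find?_cons_of_neg (by simpa using hte1)]
      constructor
      · intro hh
        have hm := List.mem_of_find?_eq_some hh
        rw [PySem.List.mem_pyRange_neg_one] at hm
        omega
      · rintro ⟨hh, _⟩
        exact absurd hh hte1

theorem pv_range_two_split (lo te : Int) (h : lo ≤ te - 1) :
    PySem.List.pyRange lo (te + 1) 1 = (PySem.List.pyRange lo (te - 1) 1 ++ [te - 1]) ++ [te] := by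
  have h2 : PySem.List.pyRange lo te 1 = PySem.List.pyRange lo (te - 1) 1 ++ [te - 1] := by
    have hh := PySem.List.pyRange_one_succ_right (a := lo) (b := te - 1) (by omega)
    rwa [show te - 1 + 1 = te from by omega] at hh
  have h1 := PySem.List.pyRange_one_succ_right (a := lo) (b := te) (by omega)
  rw [h1, h2]

theorem pv_contains_isSome (s : List Char) (lo te : Int) (c : Char) :
    ((PySem.List.pyRange lo (te + 1) 1).map
        (fun p => PySem.List.pyGetD s p (Char.ofNat 0))).contains c
      = (pvFH s lo te c).isSome := by
  rw [pv_FH_isSome s lo te c, Bool.eq_iff_iff]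
  simp [List.any_eq_true, pvAt]

theorem pv_slice_map (s : List Char) (a b : Int) (h0 : 0 ≤ a) (hab : a ≤ b)
    (hb : b ≤ (s.length : Int)) :
    PySem.List.slice s (some a) (some b)
      = (PySem.List.pyRange a b 1).map (fun p => PySem.List.pyGetD s p (Char.ofNat 0)) := by
  rw [PySem.List.slice_toNat s h0 (by omega)]
  apply List.ext_getElem
  · simp [PySem.List.length_pyRange_one]
    omega
  · intro k h1 h2
    simp only [PySem.List.length_pyRange_one, List.length_map] at h2
    simp only [List.getElem_map, PySem.List.getElem_pyRange_one]
    rw [PySem.List.pyGetD_eq_getElem s (Char.ofNat 0) (by omega) (by push_cast; omega)]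
    rw [List.getElem_take, List.getElem_drop]
    simp only [show a.toNat + k = (a + (k : Int)).toNat from by omega]

theorem pv_FH_te (s : List Char) (lo te : Int) (c : Char) (h : lo ≤ te) :
    pvFH s lo te c = some te ↔ pvAt s te = c := by
  unfold pvFH
  rw [PySem.List.pyRange_neg_one_cons (by omega)]
  by_cases hte : pvAt s te = c
  · rw [List.find?_cons_of_pos (by simpa using hte)]
    simp [hte]
  · rw [List.find?_cons_of_neg (by simpa using hte)]
    constructor
    · intro hh
      have hm := List.mem_of_find?_eq_some hh
      rw [PySem.List.mem_pyRange_neg_one] at hm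
      omega
    · intro hh
      exact absurd hh hte

theorem pv_outer_find (s : List Char) (sp te : Int) (f : Char → Option Int)
    (hA : ∀ c, pvScanA s sp te c (PySem.List.pyRange 0 (min 50 (te - sp)) 1) = (f c).map (· + 1)) :
    ∀ (cs : List Char) (c'' : Char),
      cs.find? (fun c => (f c).isSome && !(f c == some (te - 1))) = some c'' →
      ∃ p, f c'' = some p ∧ p ≠ te - 1 ∧ pvOuterA s sp te cs = p + 1 := by
  intro cs
  induction cs with
  | nil => intro c'' h; simp at h
  | cons c cs ih =>
    intro c'' hfind
    simp only [List.find?_cons] at hfind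
    by_cases hq : ((f c).isSome && !(f c == some (te - 1))) = true
    · rw [hq] at hfind
      simp only [cond_true, Option.some.injEq] at hfind
      subst hfind
      obtain ⟨p, hp⟩ : ∃ p, f c = some p := by
        rcases hx : f c with _ | p
        · rw [hx] at hq; simp at hq
        · exact ⟨p, rfl⟩
      have hpne : p ≠ te - 1 := by
        intro hh
        rw [hp, hh] at hq
        simp at hq
      refine ⟨p, hp, hpne, ?_⟩
      simp only [pvOuterA]
      rw [hA c, hp]
      simp only [Option.map_some]
      have : (p + 1 ≠ te) := by omega
      simp [this]
    · have hq' : ((f c).isSome && !(f c == some (te - 1))) = false := by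
        revert hq; cases hx : ((f c).isSome && !(f c == some (te - 1))) <;> simp
      rw [hq'] at hfind
      simp only [cond_false] at hfind
      obtain ⟨p, hp, hpne, houter⟩ := ih c'' hfind
      refine ⟨p, hp, hpne, ?_⟩
      simp only [pvOuterA]
      rw [hA c]
      cases hf : f c with
      | none => simpa using houter
      | some q =>
        have hq1 : q = te - 1 := by
          revert hq'; rw [hf]; simp
        subst hq1
        simp only [Option.map_some]
        have : ¬ (te - 1 + 1 ≠ te) := by omega
        simp only [this, if_false]
        exact houter

theorem pv_choose_first (d : PySem.Dict Char Int) (te : Int) (f : Char → Option Int) :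
    ∀ (cs : List Char) (c₀ : Char), (∀ c ∈ cs, d.get? c = f c) →
      cs.find? (fun c => (f c).isSome) = some c₀ → f c₀ = some (te - 1) →
      pvChooseB d te cs = te := by
  intro cs
  induction cs with
  | nil => intro c₀ _ h; simp at h
  | cons c cs ih =>
    intro c₀ hd hfind hf0
    simp only [List.find?_cons] at hfind
    simp only [pvChooseB]
    rw [hd c (by simp)]
    by_cases hq : (f c).isSome = true
    · rw [hq] at hfind
      simp only [cond_true, Option.some.injEq] at hfind
      subst hfind
      rw [hf0]
      show te - 1 + 1 = te
      omega
    · have hq' : (f c).isSome = false := by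
        revert hq; cases (f c).isSome <;> simp
      rw [hq'] at hfind
      simp only [cond_false] at hfind
      have hfn : f c = none := by
        revert hq'; cases hx : f c <;> simp
      rw [hfn]
      exact ih c₀ (fun c hc => hd c (by simp [hc])) hfind hf0

theorem pv_find?_last_space (q : Char → Bool) (h : pvBreakChars.find? q = some ' ') :
    q '.' = false ∧ q '!' = false ∧ q '?' = false ∧ q ',' = false := by
  simp only [pvBreakChars, List.find?_cons] at h
  by_cases h1 : q '.' = true
  · rw [h1] at h; simp at h
  · have h1' : q '.' = false := by revert h1; cases q '.' <;> simp
    rw [h1'] at h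
    simp only [cond_false] at h
    by_cases h2 : q '!' = true
    · rw [h2] at h; simp at h
    · have h2' : q '!' = false := by revert h2; cases q '!' <;> simp
      rw [h2'] at h
      simp only [cond_false] at h
      by_cases h3 : q '?' = true
      · rw [h3] at h; simp at h
      · have h3' : q '?' = false := by revert h3; cases q '?' <;> simp
        rw [h3'] at h
        simp only [cond_false] at h
        by_cases h4 : q ',' = true
        · rw [h4] at h; simp at h
        · have h4' : q ',' = false := by revert h4; cases q ',' <;> simp
          exact ⟨h1', h2', h3', h4'⟩

theorem pv_nonspace (c : Char) (h : c ∈ pvBreakChars) (h2 : c ≠ ' ') :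
    PySem.Chars.isspace c = false := by
  simp only [pvBreakChars, List.mem_cons, List.not_mem_nil, or_false] at h
  rcases h with rfl | rfl | rfl | rfl | rfl
  · decide
  · decide
  · decide
  · decide
  · exact absurd rfl h2

theorem pv_rstrip_concat (Z : List Char) (a : Char) (h : PySem.Chars.isspace a = false) :
    PySem.Chars.rstrip (Z ++ [a]) = Z ++ [a] := by
  unfold PySem.Chars.rstrip
  rw [List.reverse_append]
  simp only [List.reverse_cons, List.reverse_nil, List.nil_append, List.cons_append,
    List.nil_append]
  rw [List.dropWhile_cons_of_neg (by simp [h])]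
  simp

theorem pv_dropWhile_concat (q : Char → Bool) (Q : List Char) (a : Char) (h : q a = false) :
    ∃ R, List.dropWhile q (Q ++ [a]) = R ++ [a] := by
  rw [List.dropWhile_append]
  split_ifs with hQ
  · exact ⟨[], by rw [List.dropWhile_cons_of_neg (by simp [h])]; simp⟩
  · exact ⟨List.dropWhile q Q, rfl⟩

theorem pv_strip_ne (X Q : List Char) (a : Char) (ha : PySem.Chars.isspace a = false) :
    PySem.Chars.strip X ≠ PySem.Chars.strip (X ++ (Q ++ [a])) := by
  unfold PySem.Chars.strip PySem.Chars.lstrip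
  rw [List.dropWhile_append (xs := X)]
  split_ifs with hX
  · rw [List.isEmpty_iff] at hX
    rw [hX]
    obtain ⟨R, hR⟩ := pv_dropWhile_concat PySem.Chars.isspace Q a ha
    rw [hR, pv_rstrip_concat R a ha]
    intro hcontra
    have := congrArg List.length hcontra
    simp [PySem.Chars.rstrip] at this
  · have hassoc : List.dropWhile PySem.Chars.isspace X ++ (Q ++ [a])
        = (List.dropWhile PySem.Chars.isspace X ++ Q) ++ [a] := by simp
    rw [hassoc, pv_rstrip_concat _ a ha]
    intro hcontra
    have hlen := congrArg List.length hcontra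
    have h1 : (PySem.Chars.rstrip (List.dropWhile PySem.Chars.isspace X)).length
        ≤ (List.dropWhile PySem.Chars.isspace X).length := by
      unfold PySem.Chars.rstrip
      calc (List.dropWhile PySem.Chars.isspace
              (List.dropWhile PySem.Chars.isspace X).reverse).reverse.length
          = (List.dropWhile PySem.Chars.isspace
              (List.dropWhile PySem.Chars.isspace X).reverse).length := by simp
        _ ≤ (List.dropWhile PySem.Chars.isspace X).reverse.length :=
            List.length_dropWhile_le _ _
        _ = (List.dropWhile PySem.Chars.isspace X).length := by simp
    rw [List.length_append, List.length_append] at hlen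
    simp at hlen
    omega

theorem pv_strip_concat_space (X : List Char) :
    PySem.Chars.strip (X ++ [' ']) = PySem.Chars.strip X := by
  unfold PySem.Chars.strip PySem.Chars.lstrip
  rw [List.dropWhile_append (xs := X)]
  split_ifs with hX
  · rw [List.isEmpty_iff] at hX
    rw [hX]
    rfl
  · unfold PySem.Chars.rstrip
    rw [List.reverse_append]
    simp only [List.reverse_cons, List.reverse_nil, List.nil_append, List.cons_append]
    rw [List.dropWhile_cons_of_pos (by decide)]

theorem pv_slice_split (s : List Char) (a b c : Int) (h0 : 0 ≤ a) (h1 : a ≤ b) (h2 : b ≤ c)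
    (h3 : c ≤ (s.length : Int)) :
    PySem.List.slice s (some a) (some c)
      = PySem.List.slice s (some a) (some b) ++ PySem.List.slice s (some b) (some c) := by
  rw [pv_slice_map s a c h0 (by omega) h3, pv_slice_map s a b h0 h1 (by omega),
      pv_slice_map s b c (by omega) h2 h3, ← List.map_append,
      ← PySem.List.pyRange_one_append a b c h1 h2]

theorem pv_slice_last (s : List Char) (a b : Int) (h0 : 0 ≤ a) (h1 : a ≤ b)
    (h2 : b < (s.length : Int)) :
    PySem.List.slice s (some a) (some (b + 1))
      = PySem.List.slice s (some a) (some b) ++ [PySem.List.pyGetD s b (Char.ofNat 0)] := by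
  rw [pv_slice_split s a b (b + 1) h0 h1 (by omega) (by omega)]
  congr 1
  rw [pv_slice_map s b (b + 1) (by omega) (by omega) (by omega),
      PySem.List.pyRange_one_singleton]
  simp

theorem pv_main (s : List Char) (sp te : Int) (hsp : 0 ≤ sp) (hte : te < (s.length : Int))
    (hnd : ¬ D_find_natural_text_break_py (String.ofList s) sp te) :
    PySem.Chars.strip (PySem.List.slice s (some sp) (some (pvOuterA s sp te pvBreakChars)))
      = PySem.Chars.strip (PySem.List.slice s (some sp)
          (some (pvChooseB (pvCollectB s
              (PySem.List.pyRange te (max (sp + 1) (te - 49) - 1) (-1)) PySem.Dict.empty)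
            te pvBreakChars))) := by
  simp only [D_find_natural_text_break_py, PySem.Str.toList_slice, PySem.Chars.slice,
    PySem.Str.len_eq, String.toList_ofList] at hnd
  set lo := max (sp + 1) (te - 49) with hlo
  set f : Char → Option Int := pvFH s lo te with hfdef
  set d := pvCollectB s (PySem.List.pyRange te (lo - 1) (-1)) PySem.Dict.empty with hddef
  have hA : ∀ c, pvScanA s sp te c (PySem.List.pyRange 0 (min 50 (te - sp)) 1)
      = (f c).map (· + 1) := by
    intro c
    rw [pv_scan_eq s sp te c _ (by
      intro i hi
      rw [PySem.List.mem_pyRange_one] at hi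
      omega)]
    rw [← pv_range_map sp te]
    rfl
  have hd : ∀ c ∈ pvBreakChars, d.get? c = f c := by
    intro c hc
    rw [hddef, pv_collect_get? s _ _ c hc, hfdef]
    simp [pvFH, PySem.Dict.get?_empty]
  by_cases hfirst : ∀ c, pvBreakChars.find? (fun c => (f c).isSome) = some c →
      f c ≠ some (te - 1)
  · rw [pv_outer_choose s sp te f d hA pvBreakChars hd hfirst]
  · push_neg at hfirst
    obtain ⟨c₀, hc₀, hfc₀'⟩ := hfirst
    have hfc₀ : f c₀ = some (te - 1) := hfc₀'
    have hB : pvChooseB d te pvBreakChars = te :=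
      pv_choose_first d te f pvBreakChars c₀ hd hc₀ hfc₀
    rw [hB]
    have hwin : lo ≤ te - 1 := (pv_FH_mem s lo te c₀ (te - 1) hfc₀).1
    by_cases hpred : ∃ c' ∈ pvBreakChars, ((f c').isSome && !(f c' == some (te - 1))) = true
    · have hfs : (pvBreakChars.find? fun c => (f c).isSome && !(f c == some (te - 1))).isSome :=
        List.find?_isSome.mpr hpred
      obtain ⟨c'', hfind⟩ := Option.isSome_iff_exists.mp hfs
      obtain ⟨p'', hp'', hpne'', houter⟩ := pv_outer_find s sp te f hA pvBreakChars c'' hfind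
      rw [houter]
      by_cases hbad : p'' = te ∧ c'' = ' '
      · -- A stops one past a trailing space: strip removes it, the outputs agree
        obtain ⟨hpt, hcs⟩ := hbad
        subst hpt
        subst hcs
        have hchte : PySem.List.pyGetD s p'' (Char.ofNat 0) = ' ' := by
          have := (pv_FH_te s lo p'' ' ' (by omega)).mp hp''
          simpa [pvAt] using this
        rw [pv_slice_last s sp p'' hsp (by omega) (by omega), hchte]
        exact pv_strip_concat_space _
      · -- otherwise the input satisfies D_, contradicting hnd
        exfalso
        apply hnd
        set w := PySem.List.slice s (some lo) (some (te + 1)) with hwdef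
        have hsplit : w = ((PySem.List.pyRange lo (te - 1) 1).map
              (fun p => PySem.List.pyGetD s p (Char.ofNat 0))
            ++ [PySem.List.pyGetD s (te - 1) (Char.ofNat 0)])
            ++ [PySem.List.pyGetD s te (Char.ofNat 0)] := by
          rw [hwdef, pv_slice_map s lo (te + 1) (by omega) (by omega) (by omega),
              pv_range_two_split lo te hwin]
          simp
        have hlast : w.getLast? = some (PySem.List.pyGetD s te (Char.ofNat 0)) := by
          rw [hsplit]; simp
        have hdl : w.dropLast = (PySem.List.pyRange lo (te - 1) 1).map
            (fun p => PySem.List.pyGetD s p (Char.ofNat 0))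
            ++ [PySem.List.pyGetD s (te - 1) (Char.ofNat 0)] := by
          rw [hsplit]; simp
        have hdlast : w.dropLast.getLast? = some (PySem.List.pyGetD s (te - 1) (Char.ofNat 0)) := by
          rw [hdl]; simp
        have hdd : w.dropLast.dropLast = (PySem.List.pyRange lo (te - 1) 1).map
            (fun p => PySem.List.pyGetD s p (Char.ofNat 0)) := by
          rw [hdl]; simp
        have hpe : w.contains = (fun c => (f c).isSome) := by
          funext c'
          rw [hwdef, pv_slice_map s lo (te + 1) (by omega) (by omega) (by omega),
              pv_contains_isSome s lo te c', hfdef]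
        have hft := (pv_FH_te1 s lo te c₀ hwin).mp hfc₀
        have h1 : PySem.List.pyGetD s (te - 1) (Char.ofNat 0) = c₀ := by
          simpa [pvAt] using hft.1
        have h2 : ¬ PySem.List.pyGetD s te (Char.ofNat 0) = c₀ := by
          simpa [pvAt] using hft.2
        refine ⟨hsp, by omega, hte, ?_, ?_, ?_, ?_⟩
        · rw [hpe, hc₀, hdlast, h1]
        · rw [hdlast]
          simp
        · rw [hlast, hdlast, h1]
          simp [h2]
        · rw [List.any_eq_true]
          refine ⟨c'', List.mem_of_find?_eq_some hfind, ?_⟩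
          obtain ⟨hge, hle, h3⟩ := pv_FH_mem s lo te c'' p'' hp''
          by_cases hpte : p'' = te
          · subst hpte
            have hcs : c'' ≠ ' ' := fun hh => hbad ⟨rfl, hh⟩
            simp only [pvAt] at h3
            simp [hlast, h3, hcs]
          · have hp2 : p'' ≤ te - 2 := by omega
            have hup : pvAt s te ≠ c'' ∧ pvAt s (te - 1) ≠ c'' := by
              have hfp := hp''
              rw [hfdef] at hfp
              unfold pvFH at hfp
              rw [PySem.List.pyRange_neg_one_cons (by omega),
                  PySem.List.pyRange_neg_one_cons (by omega)] at hfp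
              simp only [List.find?_cons] at hfp
              by_cases hx : pvAt s te = c''
              · simp [hx] at hfp; omega
              · by_cases hy : pvAt s (te - 1) = c''
                · simp [hx, hy] at hfp; omega
                · exact ⟨hx, hy⟩
            obtain ⟨hu1, hu2⟩ := hup
            have hmem : c'' ∈ w.dropLast.dropLast := by
              rw [hdd]
              exact List.mem_map.mpr ⟨p'', PySem.List.mem_pyRange_one.mpr (by omega),
                by simpa [pvAt] using h3⟩
            simp only [pvAt] at hu1 hu2
            simp [hlast, hdlast, hu1, hu2, hmem]
    · -- no preferred character breaks away from te - 1: both sides give te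
      have hall : ∀ c ∈ pvBreakChars, f c = none ∨ f c = some (te - 1) := by
        intro c hc
        cases hf : f c with
        | none => exact Or.inl rfl
        | some p =>
          right
          by_cases hp : p = te - 1
          · rw [hp]
          · exact absurd ⟨c, hc, by simp [hf, hp]⟩ hpred
      rw [pv_outer_te s sp te f hA pvBreakChars hall]

-- everywhere inside D_ the two ports disagree (tightness of the change region)
theorem pv_tight (s : List Char) (sp te : Int)
    (hD : D_find_natural_text_break_py (String.ofList s) sp te) :
    PySem.Chars.strip (PySem.List.slice s (some sp) (some (pvOuterA s sp te pvBreakChars)))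
      ≠ PySem.Chars.strip (PySem.List.slice s (some sp)
          (some (pvChooseB (pvCollectB s
              (PySem.List.pyRange te (max (sp + 1) (te - 49) - 1) (-1)) PySem.Dict.empty)
            te pvBreakChars))) := by
  simp only [D_find_natural_text_break_py, PySem.Str.toList_slice, PySem.Chars.slice,
    PySem.Str.len_eq, String.toList_ofList] at hD
  obtain ⟨hsp, hte0, hte, hc4a, hc4b, hc4c, hc5⟩ := hD
  set lo := max (sp + 1) (te - 49) with hlo
  set f : Char → Option Int := pvFH s lo te with hfdef
  set d := pvCollectB s (PySem.List.pyRange te (lo - 1) (-1)) PySem.Dict.empty with hddef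
  set w := PySem.List.slice s (some lo) (some (te + 1)) with hwdef
  have hA : ∀ c, pvScanA s sp te c (PySem.List.pyRange 0 (min 50 (te - sp)) 1)
      = (f c).map (· + 1) := by
    intro c
    rw [pv_scan_eq s sp te c _ (by
      intro i hi
      rw [PySem.List.mem_pyRange_one] at hi
      omega)]
    rw [← pv_range_map sp te]
    rfl
  have hd : ∀ c ∈ pvBreakChars, d.get? c = f c := by
    intro c hc
    rw [hddef, pv_collect_get? s _ _ c hc, hfdef]
    simp [pvFH, PySem.Dict.get?_empty]
  -- dissect the first-present conjunct
  obtain ⟨c₀, hy⟩ : ∃ c₀, w.dropLast.getLast? = some c₀ := by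
    rcases hx : w.dropLast.getLast? with _ | c₀
    · exact absurd hx hc4b
    · exact ⟨c₀, rfl⟩
  have hfo : pvBreakChars.find? w.contains = some c₀ := by rw [hc4a, hy]
  -- the window has at least two cells, so lo ≤ te - 1
  have hwin : lo ≤ te - 1 := by
    have hne : w.dropLast ≠ [] := by
      intro hh
      rw [hh] at hy
      simp at hy
    have hlen : 2 ≤ w.length := by
      have := List.length_pos_iff.mpr hne
      rw [List.length_dropLast] at this
      omega
    rw [hwdef, PySem.List.slice_toNat s (by omega) (by omega)] at hlen
    simp at hlen
    omega
  have hsplit : w = ((PySem.List.pyRange lo (te - 1) 1).map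
        (fun p => PySem.List.pyGetD s p (Char.ofNat 0))
      ++ [PySem.List.pyGetD s (te - 1) (Char.ofNat 0)])
      ++ [PySem.List.pyGetD s te (Char.ofNat 0)] := by
    rw [hwdef, pv_slice_map s lo (te + 1) (by omega) (by omega) (by omega),
        pv_range_two_split lo te hwin]
    simp
  have hlast : w.getLast? = some (PySem.List.pyGetD s te (Char.ofNat 0)) := by
    rw [hsplit]; simp
  have hdl : w.dropLast = (PySem.List.pyRange lo (te - 1) 1).map
      (fun p => PySem.List.pyGetD s p (Char.ofNat 0))
      ++ [PySem.List.pyGetD s (te - 1) (Char.ofNat 0)] := by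
    rw [hsplit]; simp
  have hdlast : w.dropLast.getLast? = some (PySem.List.pyGetD s (te - 1) (Char.ofNat 0)) := by
    rw [hdl]; simp
  have hdd : w.dropLast.dropLast = (PySem.List.pyRange lo (te - 1) 1).map
      (fun p => PySem.List.pyGetD s p (Char.ofNat 0)) := by
    rw [hdl]; simp
  have hpe : w.contains = (fun c => (f c).isSome) := by
    funext c'
    rw [hwdef, pv_slice_map s lo (te + 1) (by omega) (by omega) (by omega),
        pv_contains_isSome s lo te c', hfdef]
  -- character facts at te - 1 and te
  have hch1 : PySem.List.pyGetD s (te - 1) (Char.ofNat 0) = c₀ := by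
    rw [hdlast] at hy
    simpa using hy
  have hch2 : PySem.List.pyGetD s te (Char.ofNat 0) ≠ c₀ := by
    intro hh
    apply hc4c
    rw [hlast, hdlast, hch1, hh]
  have hfc₀ : f c₀ = some (te - 1) := by
    rw [hfdef]
    exact (pv_FH_te1 s lo te c₀ hwin).mpr
      ⟨by simpa [pvAt] using hch1, by simpa [pvAt] using hch2⟩
  have hc₀mem : c₀ ∈ pvBreakChars := List.mem_of_find?_eq_some hfo
  have hB : pvChooseB d te pvBreakChars = te :=
    pv_choose_first d te f pvBreakChars c₀ hd (by rw [← hpe]; exact hfo) hfc₀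
  rw [hB]
  -- the "somewhere else too" conjunct yields a preferred char whose break is not at te - 1
  rw [List.any_eq_true] at hc5
  obtain ⟨c', hc'mem, hper⟩ := hc5
  have hperpred : ((f c').isSome && !(f c' == some (te - 1))) = true := by
    rw [Bool.or_eq_true] at hper
    rcases hper with hper1 | hper2
    · -- c' is the very last window character (and c' ≠ ' ')
      simp only [Bool.and_eq_true, hlast, beq_iff_eq, Option.some.injEq] at hper1
      have hfte : f c' = some te := by
        rw [hfdef]
        exact (pv_FH_te s lo te c' (by omega)).mpr (by simpa [pvAt] using hper1.2)
      rw [hfte]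
      simp only [Option.isSome_some, Bool.true_and, Bool.not_eq_eq_eq_not, Bool.not_true,
        beq_eq_false_iff_ne, ne_eq, Option.some.injEq]
      omega
    · -- c' occurs in the window below te - 1 and not at te - 1 or te
      simp only [Bool.and_eq_true] at hper2
      obtain ⟨⟨hn1b, hn2b⟩, hmemb⟩ := hper2
      have hn2 : PySem.List.pyGetD s (te - 1) (Char.ofNat 0) ≠ c' := by
        intro hh
        rw [hdlast, hh] at hn2b
        simp at hn2b
      obtain ⟨p, hpmem, hpch⟩ := List.mem_map.mp (by
        have := List.contains_iff_mem.mp hmemb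
        rw [hdd] at this
        exact this)
      rw [PySem.List.mem_pyRange_one] at hpmem
      have hiss : (f c').isSome := by
        rw [hfdef, pv_FH_isSome s lo te c', List.any_eq_true]
        exact ⟨p, PySem.List.mem_pyRange_one.mpr (by omega), by simp [pvAt, hpch]⟩
      have hne : f c' ≠ some (te - 1) := by
        intro hh
        rw [hfdef] at hh
        have := (pv_FH_te1 s lo te c' hwin).mp hh
        exact hn2 (by simpa [pvAt] using this.1)
      have hbeq : (f c' == some (te - 1)) = false := beq_eq_false_iff_ne.mpr hne
      simp [hiss, hbeq]
  have hfs : (pvBreakChars.find? fun c => (f c).isSome && !(f c == some (te - 1))).isSome :=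
    List.find?_isSome.mpr ⟨c', hc'mem, hperpred⟩
  obtain ⟨c'', hfind⟩ := Option.isSome_iff_exists.mp hfs
  obtain ⟨p'', hp'', hpne'', houter⟩ := pv_outer_find s sp te f hA pvBreakChars c'' hfind
  rw [houter]
  obtain ⟨hge'', hle'', hch''⟩ := pv_FH_mem s lo te c'' p'' hp''
  -- rule out the lone trailing-space pick: it would leave the per-witness c' impossible
  have hgood : ¬ (p'' = te ∧ c'' = ' ') := by
    rintro ⟨hpt, hcs⟩
    subst hcs
    rw [hpt] at hp''
    have hchte : PySem.List.pyGetD s te (Char.ofNat 0) = ' ' := by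
      have := (pv_FH_te s lo te ' ' (by omega)).mp hp''
      simpa [pvAt] using this
    obtain ⟨q1, q2, q3, q4⟩ := pv_find?_last_space _ hfind
    have hc'ne : c' ≠ ' ' := by
      rintro rfl
      rw [Bool.or_eq_true] at hper
      rcases hper with h1 | h2
      · simp at h1
      · rw [hlast, hchte] at h2
        simp at h2
    have hfour : c' = '.' ∨ c' = '!' ∨ c' = '?' ∨ c' = ',' := by
      simp only [pvBreakChars, List.mem_cons, List.not_mem_nil, or_false] at hc'mem
      rcases hc'mem with rfl | rfl | rfl | rfl | rfl
      · exact Or.inl rfl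
      · exact Or.inr (Or.inl rfl)
      · exact Or.inr (Or.inr (Or.inl rfl))
      · exact Or.inr (Or.inr (Or.inr rfl))
      · exact absurd rfl hc'ne
    rcases hfour with rfl | rfl | rfl | rfl
    · simp [hperpred] at q1
    · simp [hperpred] at q2
    · simp [hperpred] at q3
    · simp [hperpred] at q4
  by_cases hpte : p'' = te
  · -- A's slice extends B's by the non-space break char at te
    subst hpte
    have hcsne : c'' ≠ ' ' := fun hh => hgood ⟨rfl, hh⟩
    have hchte : PySem.List.pyGetD s p'' (Char.ofNat 0) = c'' := by
      have := (pv_FH_te s lo p'' c'' (by omega)).mp hp''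
      simpa [pvAt] using this
    rw [pv_slice_last s sp p'' hsp (by omega) (by omega), hchte]
    have := pv_strip_ne (PySem.List.slice s (some sp) (some p'')) [] c''
      (pv_nonspace c'' (List.mem_of_find?_eq_some hfind) hcsne)
    simpa using this.symm
  · -- B's slice extends A's and ends with the break char c₀, which is not a space
    have hp2 : p'' ≤ te - 2 := by omega
    have hc₀ne : c₀ ≠ ' ' := by
      rintro rfl
      obtain ⟨q1, q2, q3, q4⟩ := pv_find?_last_space _ hfo
      have hc'ne : c' ≠ ' ' := by
        rintro rfl
        rw [Bool.or_eq_true] at hper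
        rcases hper with h1 | h2
        · simp at h1
        · rw [hdlast, hch1] at h2
          simp at h2
      have hc'w : c' ∈ w := by
        rw [Bool.or_eq_true] at hper
        rcases hper with h1 | h2
        · simp only [Bool.and_eq_true, hlast, beq_iff_eq, Option.some.injEq] at h1
          rw [hsplit]
          simp [h1.2]
        · simp only [Bool.and_eq_true] at h2
          have hmm : c' ∈ w.dropLast.dropLast := List.contains_iff_mem.mp h2.2
          exact (List.dropLast_sublist _).subset ((List.dropLast_sublist _).subset hmm)
      have hcw : w.contains c' = true := List.contains_iff_mem.mpr hc'w
      have hfour : c' = '.' ∨ c' = '!' ∨ c' = '?' ∨ c' = ',' := by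
        simp only [pvBreakChars, List.mem_cons, List.not_mem_nil, or_false] at hc'mem
        rcases hc'mem with rfl | rfl | rfl | rfl | rfl
        · exact Or.inl rfl
        · exact Or.inr (Or.inl rfl)
        · exact Or.inr (Or.inr (Or.inl rfl))
        · exact Or.inr (Or.inr (Or.inr rfl))
        · exact absurd rfl hc'ne
      rcases hfour with rfl | rfl | rfl | rfl
      · exact absurd hc'w (by simpa using q1)
      · exact absurd hc'w (by simpa using q2)
      · exact absurd hc'w (by simpa using q3)
      · exact absurd hc'w (by simpa using q4)
    have hns : PySem.Chars.isspace c₀ = false := pv_nonspace c₀ hc₀mem hc₀ne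
    have hEsplit := pv_slice_last s (p'' + 1) (te - 1) (by omega) (by omega) (by omega)
    rw [show te - 1 + 1 = te from by omega] at hEsplit
    rw [pv_slice_split s sp (p'' + 1) te hsp (by omega) (by omega) (by omega), hEsplit, hch1]
    exact pv_strip_ne _ _ c₀ hns

-- ===== VERDICT (by name: the statement is the Claim_ definition above) =====
theorem find_natural_text_break_py_spec : Claim_unchanged_find_natural_text_break_py := by
  intro ft sp te hdom hpre hnd
  simp only [find_natural_text_break_py, find_natural_text_break_py_alt]
  by_cases hbig : te ≥ (ft.toList.length : Int)
  · rw [if_pos hbig, if_pos hbig]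
  · rw [if_neg hbig, if_neg hbig]
    exact congrArg String.ofList (pv_main ft.toList sp te hpre (by omega)
      (by rw [String.ofList_toList]; exact hnd))

theorem find_natural_text_break_py_changed : Claim_changed_find_natural_text_break_py := by
  unfold Claim_changed_find_natural_text_break_py; decide

theorem find_natural_text_break_py_tight : Claim_exact_find_natural_text_break_py := by
  intro ft sp te hdom hpre hD
  have hte : te < (ft.toList.length : Int) := by
    obtain ⟨_, _, h, _⟩ := hD
    exact h
  simp only [find_natural_text_break_py, find_natural_text_break_py_alt]
  rw [if_neg (by omega), if_neg (by omega)]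
  intro h
  have h2 := congrArg String.toList h
  simp only [String.toList_ofList] at h2
  exact pv_tight ft.toList sp te (by rw [String.ofList_toList]; exact hD) h2
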